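-- pv_equiv track=rewrite | github.com/victor-geere/vxl | vxl/decoder.py | _format_jsx_return
-- ===== SOURCE A (Python) =====
-- from typing import List, Dict, Optional, Tuple
--
-- def _format_jsx_return(jsx: str, indent: str) -> List[str]:
--     """Format a compressed JSX return into indented multi-line output."""
--     lines = [f"{indent}return ("]
--     # Tokenize by JSX boundaries: opening tags, closing tags, self-closing, and content
--     # Split on spaces between top-level tokens
--     tokens = _tokenize_jsx(jsx.strip())
--     depth = 0
--     base_indent = indent + "  "
--     for token in tokens:
--         cur = base_indent + ("  " * depth)
--         if token.startswith("</"):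
--             # Closing tag — dedent first
--             depth = max(0, depth - 1)
--             cur = base_indent + ("  " * depth)
--             lines.append(f"{cur}{token}")
--         elif token.startswith("<") and not token.endswith("/>") and ">" in token:
--             # Opening tag — print then indent
--             lines.append(f"{cur}{token}")
--             depth += 1
--         else:
--             # Self-closing tag, expression, or text
--             lines.append(f"{cur}{token}")
--     lines.append(f"{indent});")
--     return lines
--
-- def _tokenize_jsx(jsx: str) -> List[str]:
--     """Split compressed JSX into logical tokens (tags, expressions, text)."""
--     tokens = []
--     i = 0
--     while i < len(jsx):
--         # Skip whitespace
--         while i < len(jsx) and jsx[i] == " ":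
--             i += 1
--         if i >= len(jsx):
--             break
--         if jsx[i] == "{":
--             # JSX expression — find matching }
--             depth = 0
--             start = i
--             while i < len(jsx):
--                 if jsx[i] == "{":
--                     depth += 1
--                 elif jsx[i] == "}":
--                     depth -= 1
--                     if depth == 0:
--                         i += 1
--                         break
--                 i += 1
--             tokens.append(jsx[start:i])
--         elif jsx[i] == "<":
--             # Tag — find matching >
--             start = i
--             i += 1
--             while i < len(jsx) and jsx[i] != ">":
--                 i += 1
--             i += 1  # past >
--             tokens.append(jsx[start:i])
--         else:
--             # Text content
--             start = i
--             while i < len(jsx) and jsx[i] not in "<{":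
--                 i += 1
--             text = jsx[start:i].strip()
--             if text:
--                 tokens.append(text)
--     return tokens
-- ===== SOURCE B (Python) =====
-- def _format_jsx_return(jsx: str, indent: str) -> list:
--     """Staged pipeline: str.find-jump tokenizer, then signed prefix depths, then a
--     running-minimum pass realizing the max(0,.) clamp as p - min-prefix, zipped into lines."""
--     s = jsx.strip()
--     n = len(s)
--     # Stage 1: tokens, located with str.find jumps instead of per-character walks
--     tokens = []
--     i = 0
--     while i < n:
--         c = s[i]
--         if c == " ":
--             i += 1
--         elif c == "{":
--             d, j = 1, i + 1
--             while d:
--                 nc = s.find("}", j)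
--                 if nc == -1:
--                     j = n
--                     break
--                 no = s.find("{", j)
--                 if no != -1 and no < nc:
--                     d += 1
--                     j = no + 1
--                 else:
--                     d -= 1
--                     j = nc + 1
--             tokens.append(s[i:j])
--             i = j
--         elif c == "<":
--             g = s.find(">", i)
--             j = n if g == -1 else g + 1
--             tokens.append(s[i:j])
--             i = j
--         else:
--             j2 = s.find("<", i)
--             j3 = s.find("{", i)
--             j = min(x for x in (j2, j3, n) if x != -1)
--             t = s[i:j].strip()
--             if t:
--                 tokens.append(t)
--             i = j
--     # Stage 2: signed depth at emission time for each token
--     emit = []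
--     p = 0
--     for t in tokens:
--         if t.startswith("</"):
--             p -= 1
--         emit.append(p)
--         if t.startswith("<") and not t.startswith("</") and ">" in t and not t.endswith("/>"):
--             p += 1
--     # Stage 3: clamp by running minimum, then zip everything into the output lines
--     mins = []
--     m = 0
--     for q in emit:
--         m = min(m, q)
--         mins.append(m)
--     base = indent + "  "
--     body = [base + "  " * (q - mm) + t for t, q, mm in zip(tokens, emit, mins)]
--     return [indent + "return ("] + body + [indent + ");"]
-- ===== Notes on version B (the rewrite author's own statement) =====
-- stated objective: faster
-- what changed: A tokenizes char-by-char and then folds over the token list with a clamped depth counter; B is a staged pipeline: a str.find-jump tokenizer (scanning done by C-level str.find instead of per-character Python loops), a pass of signed prefix depths, and a separate running-minimum pass that realizes the max(0,.) clamp as p - min-prefix, finally zipped into the output lines.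
import Mathlib
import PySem

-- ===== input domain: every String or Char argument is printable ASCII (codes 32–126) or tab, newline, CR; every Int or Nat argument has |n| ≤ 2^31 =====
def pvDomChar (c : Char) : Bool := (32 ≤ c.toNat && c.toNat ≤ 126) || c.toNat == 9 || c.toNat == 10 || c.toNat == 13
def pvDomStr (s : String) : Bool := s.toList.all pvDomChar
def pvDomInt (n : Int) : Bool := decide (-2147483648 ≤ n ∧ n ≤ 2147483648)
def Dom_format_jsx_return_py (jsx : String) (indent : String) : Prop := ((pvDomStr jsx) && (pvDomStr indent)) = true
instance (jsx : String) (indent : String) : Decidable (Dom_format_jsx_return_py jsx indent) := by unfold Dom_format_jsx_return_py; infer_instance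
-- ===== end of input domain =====

-- B replaces A's char-by-char tokenizer + clamped depth counter by a staged pipeline:
-- a str.find-jump tokenizer (constant-factor faster in Python, as measured), signed prefix
-- depths, and a running-minimum pass realizing the max(0,·) clamp as p − min-prefix;
-- return values proved equal on all inputs.

-- "  " * depth
def pvDup (d : Nat) : List Char := List.flatten (List.replicate d [' ', ' '])

-- ===== PORT A =====
-- _tokenize_jsx '{' branch: while loop matching braces (depth = current open depth; Python's
-- `depth -= 1; if depth == 0` is the `depth = 1` test here); acc holds the token so far, reversed.
def pvBraceA : List Char → Nat → List Char → (List Char × List Char)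
  | [], _, acc => (acc.reverse, [])
  | c :: rest, depth, acc =>
    if c = '{' then pvBraceA rest (depth + 1) (c :: acc)
    else if c = '}' then
      (if depth = 1 then ((c :: acc).reverse, rest) else pvBraceA rest (depth - 1) (c :: acc))
    else pvBraceA rest depth (c :: acc)

-- '<' branch: advance to the first '>' (inclusive), or to the end of the string
def pvTagA : List Char → List Char → (List Char × List Char)
  | [], acc => (acc.reverse, [])
  | c :: rest, acc => if c = '>' then ((c :: acc).reverse, rest) else pvTagA rest (c :: acc)

-- text branch: advance while the char is not in "<{"
def pvTextA : List Char → List Char → (List Char × List Char)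
  | [], acc => (acc.reverse, [])
  | c :: rest, acc =>
    if c = '<' ∨ c = '{' then (acc.reverse, c :: rest) else pvTextA rest (c :: acc)

theorem pvBraceA_snd_le : ∀ (cs : List Char) (d : Nat) (acc : List Char),
    (pvBraceA cs d acc).2.length ≤ cs.length := by
  intro cs
  induction cs with
  | nil => intro d acc; simp [pvBraceA]
  | cons c rest ih =>
    intro d acc
    simp only [pvBraceA]
    split_ifs <;> simp <;> exact Nat.le_succ_of_le (ih _ _)

theorem pvTagA_snd_le : ∀ (cs : List Char) (acc : List Char),
    (pvTagA cs acc).2.length ≤ cs.length := by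
  intro cs
  induction cs with
  | nil => intro acc; simp [pvTagA]
  | cons c rest ih =>
    intro acc
    simp only [pvTagA]
    split_ifs <;> simp <;> exact Nat.le_succ_of_le (ih _)

theorem pvTextA_snd_le : ∀ (cs : List Char) (acc : List Char),
    (pvTextA cs acc).2.length ≤ cs.length := by
  intro cs
  induction cs with
  | nil => intro acc; simp [pvTextA]
  | cons c rest ih =>
    intro acc
    simp only [pvTextA]
    split_ifs <;> simp <;> exact Nat.le_succ_of_le (ih _)

-- _tokenize_jsx main while loop (the leading "skip spaces" inner while is the ' ' case)
def pvTokA : List Char → List (List Char)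
  | [] => []
  | c :: rest =>
    if c = ' ' then pvTokA rest
    else if c = '{' then
      -- first iteration of the brace loop (reading the '{' itself) performed here
      (pvBraceA rest 1 ['{']).1 :: pvTokA (pvBraceA rest 1 ['{']).2
    else if c = '<' then
      (pvTagA rest ['<']).1 :: pvTokA (pvTagA rest ['<']).2
    else
      let t := PySem.Chars.strip (pvTextA rest [c]).1
      if t = [] then pvTokA (pvTextA rest [c]).2
      else t :: pvTokA (pvTextA rest [c]).2
termination_by cs => cs.length
decreasing_by
  all_goals apply Nat.lt_succ_of_le
  · simp
  all_goals first
    | exact pvBraceA_snd_le rest 1 ['{']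
    | exact pvTagA_snd_le rest ['<']
    | exact pvTextA_snd_le rest [c]

-- the body of A's `for token in tokens` loop; state = (lines, depth); Nat subtraction is max(0, depth-1)
def pvStepA (base : List Char) (st : List (List Char) × Nat) (token : List Char) : List (List Char) × Nat :=
  if PySem.Chars.startswith token ['<', '/'] then
    (st.1 ++ [base ++ pvDup (st.2 - 1) ++ token], st.2 - 1)
  else if PySem.Chars.startswith token ['<'] && !PySem.Chars.endswith token ['/', '>']
          && PySem.Chars.isIn ['>'] token then
    (st.1 ++ [base ++ pvDup st.2 ++ token], st.2 + 1)
  else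
    (st.1 ++ [base ++ pvDup st.2 ++ token], st.2)

def format_jsx_return_py (jsx : String) (indent : String) : List String :=
  let ind := indent.toList
  let lines := [ind ++ "return (".toList]
  let tokens := pvTokA (PySem.Chars.strip jsx.toList)
  let base := ind ++ [' ', ' ']
  let res := tokens.foldl (pvStepA base) (lines, 0)
  (res.1 ++ [ind ++ [')', ';']]).map String.mk

-- ===== PORT B =====
-- Stage-1 '{' branch: Source B's `while d:` loop jumping between s.find("}") / s.find("{");
-- r is the remainder after the current position, the result is the number of chars consumed.
-- (Python's find(...) == -1 is findIdx? = none; indices are remainder-relative.)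
def pvBraceJumpB (r : List Char) (d : Nat) : Nat :=
  match h : r.findIdx? (· == '}') with
  | none => r.length
  | some kc =>
    match r.findIdx? (· == '{') with
    | some ko =>
      if ko < kc then (ko + 1) + pvBraceJumpB (r.drop (ko + 1)) (d + 1)
      else if d = 1 then kc + 1 else (kc + 1) + pvBraceJumpB (r.drop (kc + 1)) (d - 1)
    | none => if d = 1 then kc + 1 else (kc + 1) + pvBraceJumpB (r.drop (kc + 1)) (d - 1)
termination_by r.length
decreasing_by
  all_goals
    cases r with
    | nil => simp at h
    | cons a l => simp

-- Stage-1 main loop: dispatch on the current char, locate the token end with find-jumps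
def pvTokB : List Char → List (List Char)
  | [] => []
  | c :: rest =>
    if c = ' ' then pvTokB rest
    else if c = '{' then
      let k := pvBraceJumpB rest 1
      ('{' :: rest.take k) :: pvTokB (rest.drop k)
    else if c = '<' then
      -- g = s.find(">", i): s[i] = '<' ≠ '>', so search the remainder
      match rest.findIdx? (· == '>') with
      | none => [('<' :: rest)]   -- j = n: token runs to the end, loop terminates
      | some j => ('<' :: rest.take (j + 1)) :: pvTokB (rest.drop (j + 1))
    else
      -- j = min(find("<", i), find("{", i), n) with -1 mapped to n; c itself matches neither
      let k := min ((rest.findIdx? (· == '<')).getD rest.length)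
                   ((rest.findIdx? (· == '{')).getD rest.length)
      let t := PySem.Chars.strip (c :: rest.take k)
      if t = [] then pvTokB (rest.drop k) else t :: pvTokB (rest.drop k)
termination_by cs => cs.length
decreasing_by
  all_goals apply Nat.lt_succ_of_le
  all_goals simp

-- Stage 2's opening-tag test
def pvOpenerB (t : List Char) : Bool :=
  PySem.Chars.startswith t ['<'] && !PySem.Chars.startswith t ['<', '/']
    && PySem.Chars.isIn ['>'] t && !PySem.Chars.endswith t ['/', '>']

-- Stage 2: signed depth at emission time for each token
def pvEmitB : List (List Char) → Int → List Int
  | [], _ => []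
  | t :: ts, p =>
    let p1 := if PySem.Chars.startswith t ['<', '/'] then p - 1 else p
    let p2 := if pvOpenerB t then p1 + 1 else p1
    p1 :: pvEmitB ts p2

-- Stage 3: running minimum
def pvMinB : List Int → Int → List Int
  | [], _ => []
  | q :: qs, m => min m q :: pvMinB qs (min m q)

def format_jsx_return_py_alt (jsx : String) (indent : String) : List String :=
  let ind := indent.toList
  let tokens := pvTokB (PySem.Chars.strip jsx.toList)
  let emit := pvEmitB tokens 0
  let mins := pvMinB emit 0
  let base := ind ++ [' ', ' ']
  let body := List.zipWith (fun t pm => base ++ pvDup (pm.1 - pm.2).toNat ++ t)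
                tokens (emit.zip mins)
  ((ind ++ "return (".toList) :: (body ++ [ind ++ [')', ';']])).map String.mk

-- ===== PRECONDITION & SPEC =====
def Spec_format_jsx_return_py (jsx : String) (indent : String) (out : List String) : Prop := out = format_jsx_return_py_alt jsx indent
instance (jsx : String) (indent : String) (out : List String) : Decidable (Spec_format_jsx_return_py jsx indent out) := by unfold Spec_format_jsx_return_py; infer_instance

-- ===== CLAIM (what is proved, stated in full; the proofs are below) =====
def Claim_equal_format_jsx_return_py : Prop := ∀ (jsx : String) (indent : String), Dom_format_jsx_return_py jsx indent → Spec_format_jsx_return_py jsx indent (format_jsx_return_py jsx indent)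

-- ===== LEMMAS AND PROOFS =====

-- A's per-token loop as a line-producing recursion
def pvRender (base : List Char) : List (List Char) → Nat → List (List Char)
  | [], _ => []
  | t :: ts, d =>
    if PySem.Chars.startswith t ['<', '/'] then
      (base ++ pvDup (d - 1) ++ t) :: pvRender base ts (d - 1)
    else if PySem.Chars.startswith t ['<'] && !PySem.Chars.endswith t ['/', '>']
            && PySem.Chars.isIn ['>'] t then
      (base ++ pvDup d ++ t) :: pvRender base ts (d + 1)
    else
      (base ++ pvDup d ++ t) :: pvRender base ts d

theorem pvFoldA (base : List Char) : ∀ (ts : List (List Char)) (lines : List (List Char)) (d : Nat),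
    (ts.foldl (pvStepA base) (lines, d)).1 = lines ++ pvRender base ts d := by
  intro ts
  induction ts with
  | nil => intro lines d; simp [pvRender]
  | cons t ts ih =>
    intro lines d
    simp only [List.foldl, pvStepA, pvRender]
    split_ifs <;> simp [ih]

-- character-scan length of the balanced {...} token (proof-side reference; d = open depth)
def pvBraceLenB : List Char → Nat → Nat
  | [], _ => 0
  | c :: rest, d =>
    if c = '{' then 1 + pvBraceLenB rest (d + 1)
    else if c = '}' then (if d = 1 then 1 else 1 + pvBraceLenB rest (d - 1))
    else 1 + pvBraceLenB rest d

theorem pvBrace_split : ∀ (cs : List Char) (d : Nat) (acc : List Char), 1 ≤ d →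
    pvBraceA cs d acc = (acc.reverse ++ cs.take (pvBraceLenB cs d), cs.drop (pvBraceLenB cs d)) := by
  intro cs
  induction cs with
  | nil => intro d acc _; simp [pvBraceA, pvBraceLenB]
  | cons c rest ih =>
    intro d acc hd
    simp only [pvBraceA, pvBraceLenB]
    split_ifs with h1 h2 h3
    · rw [ih (d + 1) (c :: acc) (by omega)]
      simp [Nat.add_comm 1]
    · simp
    · rw [ih (d - 1) (c :: acc) (by omega)]
      simp [Nat.add_comm 1]
    · rw [ih d (c :: acc) hd]
      simp [Nat.add_comm 1]

theorem pvTag_split : ∀ (cs : List Char) (acc : List Char),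
    pvTagA cs acc = (acc.reverse ++ cs.takeWhile (· != '>')
        ++ (if cs.dropWhile (· != '>') = [] then [] else ['>']),
      if cs.dropWhile (· != '>') = [] then [] else (cs.dropWhile (· != '>')).tail) := by
  intro cs
  induction cs with
  | nil => intro acc; simp [pvTagA]
  | cons c rest ih =>
    intro acc
    simp only [pvTagA]
    by_cases h : c = '>'
    · subst h; simp
    · rw [if_neg h, ih (c :: acc)]
      simp [List.takeWhile_cons, List.dropWhile_cons, h]

theorem pvText_split : ∀ (cs : List Char) (acc : List Char),
    pvTextA cs acc = (acc.reverse ++ cs.takeWhile (fun x => x != '<' && x != '{'),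
      cs.dropWhile (fun x => x != '<' && x != '{')) := by
  intro cs
  induction cs with
  | nil => intro acc; simp [pvTextA]
  | cons c rest ih =>
    intro acc
    simp only [pvTextA]
    by_cases h : c = '<' ∨ c = '{'
    · rw [if_pos h]
      have hp : (c != '<' && c != '{') = false := by
        rcases h with h | h <;> simp [h]
      simp [List.takeWhile_cons, List.dropWhile_cons, hp]
    · rw [if_neg h]
      push_neg at h
      have hp : (c != '<' && c != '{') = true := by simp [h.1, h.2]
      rw [ih (c :: acc)]
      simp [List.takeWhile_cons, List.dropWhile_cons, hp]

-- when the remainder holds no '}', the char scan consumes everything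
theorem pvBraceLen_noClose : ∀ (r : List Char) (d : Nat),
    r.findIdx? (· == '}') = none → pvBraceLenB r d = r.length := by
  intro r
  induction r with
  | nil => intro d _; simp [pvBraceLenB]
  | cons c rest ih =>
    intro d h
    rw [List.findIdx?_cons] at h
    by_cases hc : (c == '}') = true
    · simp [hc] at h
    · simp only [Bool.not_eq_true] at hc
      rw [hc] at h
      simp only [Bool.false_eq_true, if_false, Option.map_eq_none_iff] at h
      have hne : ¬ c = '}' := by intro e; rw [e] at hc; simp at hc
      simp only [pvBraceLenB, List.length_cons]
      by_cases hb : c = '{'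
      · rw [if_pos hb, ih _ h]; omega
      · rw [if_neg hb, if_neg hne, ih _ h]; omega

-- unfolding equations of the find-jump scan
theorem pvJump_none (r : List Char) (d : Nat) (h : r.findIdx? (· == '}') = none) :
    pvBraceJumpB r d = r.length := by
  rw [pvBraceJumpB]
  split
  · rfl
  · rename_i kc heq; rw [h] at heq; cases heq

theorem pvJump_open (r : List Char) (d kc ko : Nat)
    (hkc : r.findIdx? (· == '}') = some kc) (hko : r.findIdx? (· == '{') = some ko)
    (hlt : ko < kc) :
    pvBraceJumpB r d = (ko + 1) + pvBraceJumpB (r.drop (ko + 1)) (d + 1) := by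
  rw [pvBraceJumpB]
  split
  · rename_i heq; rw [hkc] at heq; cases heq
  · rename_i kc' heq
    rw [hkc] at heq
    injection heq with e
    subst e
    split
    · rename_i ko' heq2
      rw [hko] at heq2
      injection heq2 with e2
      subst e2
      rw [if_pos hlt]
    · rename_i heq2; rw [hko] at heq2; cases heq2

theorem pvJump_close (r : List Char) (d kc : Nat)
    (hkc : r.findIdx? (· == '}') = some kc)
    (hnlt : ∀ ko, r.findIdx? (· == '{') = some ko → ¬ ko < kc) :
    pvBraceJumpB r d = if d = 1 then kc + 1 else (kc + 1) + pvBraceJumpB (r.drop (kc + 1)) (d - 1) := by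
  rw [pvBraceJumpB]
  split
  · rename_i heq; rw [hkc] at heq; cases heq
  · rename_i kc' heq
    rw [hkc] at heq
    injection heq with e
    subst e
    split
    · rename_i ko' heq2
      rw [if_neg (hnlt ko' heq2)]
    · rfl

-- a non-brace head just shifts the jump scan by one
theorem pvBraceJump_shift (c : Char) (r : List Char) (d : Nat)
    (hc1 : ¬ c = '{') (hc2 : ¬ c = '}') :
    pvBraceJumpB (c :: r) d = 1 + pvBraceJumpB r d := by
  have b1 : (c == '{') = false := by simp [hc1]
  have b2 : (c == '}') = false := by simp [hc2]
  have f1 : (c :: r).findIdx? (· == '}') = (r.findIdx? (· == '}')).map (· + 1) := by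
    rw [List.findIdx?_cons, b2]; simp
  have f2 : (c :: r).findIdx? (· == '{') = (r.findIdx? (· == '{')).map (· + 1) := by
    rw [List.findIdx?_cons, b1]; simp
  cases h1 : r.findIdx? (· == '}') with
  | none =>
    rw [pvJump_none _ _ (by rw [f1, h1]; rfl), pvJump_none _ _ h1]
    simp [Nat.add_comm]
  | some kc =>
    have hk : (c :: r).findIdx? (· == '}') = some (kc + 1) := by rw [f1, h1]; rfl
    cases h2 : r.findIdx? (· == '{') with
    | none =>
      have hn : ∀ ko, (c :: r).findIdx? (· == '{') = some ko → ¬ ko < kc + 1 := by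
        intro ko h; rw [f2, h2] at h; cases h
      rw [pvJump_close _ d _ hk hn,
        pvJump_close _ d _ h1 (by intro ko h; rw [h2] at h; cases h)]
      rw [List.drop_succ_cons]
      split_ifs <;> omega
    | some ko =>
      have hko' : (c :: r).findIdx? (· == '{') = some (ko + 1) := by rw [f2, h2]; rfl
      by_cases hlt : ko < kc
      · rw [pvJump_open _ d _ _ hk hko' (by omega), pvJump_open _ d _ _ h1 h2 hlt]
        rw [List.drop_succ_cons]
        omega
      · have hn : ∀ ko', (c :: r).findIdx? (· == '{') = some ko' → ¬ ko' < kc + 1 := by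
          intro ko' h; rw [hko'] at h; injection h with e; omega
        have hn2 : ∀ ko', r.findIdx? (· == '{') = some ko' → ¬ ko' < kc := by
          intro ko' h; rw [h2] at h; injection h with e; omega
        rw [pvJump_close _ d _ hk hn, pvJump_close _ d _ h1 hn2]
        rw [List.drop_succ_cons]
        split_ifs <;> omega

-- the find-jump brace scan equals the char scan
theorem pvBraceJump_eq : ∀ (r : List Char) (d : Nat), 1 ≤ d →
    pvBraceJumpB r d = pvBraceLenB r d := by
  intro r
  induction r with
  | nil => intro d _; rw [pvJump_none [] d (by simp)]; simp [pvBraceLenB]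
  | cons c rest ih =>
    intro d hd
    by_cases hc1 : c = '{'
    · subst hc1
      have f1 : ('{' :: rest).findIdx? (· == '}') = (rest.findIdx? (· == '}')).map (· + 1) := by
        rw [List.findIdx?_cons]; simp
      have f2 : ('{' :: rest).findIdx? (· == '{') = some 0 := by
        rw [List.findIdx?_cons]; simp
      cases h1 : rest.findIdx? (· == '}') with
      | none =>
        rw [pvJump_none _ _ (by rw [f1, h1]; rfl)]
        rw [pvBraceLen_noClose ('{' :: rest) d (by rw [f1, h1]; rfl)]
      | some kc =>
        rw [pvJump_open _ d (kc + 1) 0 (by rw [f1, h1]; rfl) f2 (by omega)]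
        rw [show ('{' :: rest).drop (0 + 1) = rest from rfl]
        rw [ih _ (by omega)]
        simp [pvBraceLenB]
    · by_cases hc2 : c = '}'
      · subst hc2
        have f1 : ('}' :: rest).findIdx? (· == '}') = some 0 := by
          rw [List.findIdx?_cons]; simp
        have hn : ∀ ko, ('}' :: rest).findIdx? (· == '{') = some ko → ¬ ko < 0 := by
          intro ko _; omega
        rw [pvJump_close _ d 0 f1 hn]
        by_cases hda : d = 1
        · simp [hda, pvBraceLenB]
        · rw [if_neg hda]
          rw [show ('}' :: rest).drop (0 + 1) = rest from rfl]
          rw [ih _ (by omega)]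
          simp [pvBraceLenB, hda]
      · rw [pvBraceJump_shift c rest d hc1 hc2, ih _ hd]
        simp [pvBraceLenB, hc1, hc2]

-- take/drop at a findIdx? position vs takeWhile/dropWhile of the negated predicate
theorem pvTakeFind (r : Char → Bool) : ∀ (l : List Char),
    l.take ((l.findIdx? r).getD l.length) = l.takeWhile (fun x => !r x) ∧
    l.drop ((l.findIdx? r).getD l.length) = l.dropWhile (fun x => !r x) := by
  intro l
  induction l with
  | nil => simp
  | cons c rest ih =>
    rw [List.findIdx?_cons]
    by_cases hc : r c = true
    · simp [hc]
    · simp only [Bool.not_eq_true] at hc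
      simp only [hc, Bool.false_eq_true, if_false, List.takeWhile_cons, List.dropWhile_cons,
        Bool.not_false, if_true]
      cases h2 : rest.findIdx? r with
      | none =>
        rw [h2] at ih
        simp only [Option.getD_none] at ih
        simp [ih.1, ih.2]
      | some j =>
        rw [h2] at ih
        simp only [Option.getD_some] at ih
        simp [ih.1, ih.2]

-- specialization for the '>' search in the tag branch
theorem pvFindGt : ∀ (l : List Char) (j : Nat), l.findIdx? (· == '>') = some j →
    l.take (j + 1) = l.takeWhile (· != '>') ++ ['>'] ∧
    l.drop (j + 1) = (l.dropWhile (· != '>')).tail ∧ l.dropWhile (· != '>') ≠ [] := by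
  intro l
  induction l with
  | nil => intro j h; rw [List.findIdx?_nil] at h; cases h
  | cons c rest ih =>
    intro j h
    rw [List.findIdx?_cons] at h
    by_cases hc : c = '>'
    · subst hc
      simp only [show (('>' : Char) == '>') = true from by decide, if_true,
        Option.some.injEq] at h
      subst h
      simp
    · have hcb : (c == '>') = false := by simp [hc]
      rw [hcb] at h
      simp only [Bool.false_eq_true, if_false] at h
      cases h2 : rest.findIdx? (· == '>') with
      | none => rw [h2] at h; cases h
      | some j' =>
        rw [h2] at h
        simp only [Option.map_some, Option.some.injEq] at h
        subst h
        obtain ⟨e1, e2, e3⟩ := ih j' h2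
        refine ⟨?_, ?_, ?_⟩
        · simp [List.take_succ_cons, List.takeWhile_cons, hc, e1]
        · simp [List.drop_succ_cons, List.dropWhile_cons, hc, e2]
        · simp [List.dropWhile_cons, hc, e3]

theorem pvFindGtNone : ∀ (l : List Char), l.findIdx? (· == '>') = none →
    l.takeWhile (· != '>') = l ∧ l.dropWhile (· != '>') = [] := by
  intro l h
  rw [List.findIdx?_eq_none_iff] at h
  constructor
  · rw [List.takeWhile_eq_self_iff]
    intro x hx; simpa using h x hx
  · rw [List.dropWhile_eq_nil_iff]
    intro x hx; simpa using h x hx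

-- the min of the two finds is the find of the disjunction
theorem pvFindMin : ∀ (l : List Char),
    min ((l.findIdx? (· == '<')).getD l.length) ((l.findIdx? (· == '{')).getD l.length)
      = (l.findIdx? (fun x => x == '<' || x == '{')).getD l.length := by
  intro l
  induction l with
  | nil => simp
  | cons c rest ih =>
    rw [List.findIdx?_cons, List.findIdx?_cons, List.findIdx?_cons]
    by_cases h1 : c = '<'
    · simp [h1]
    · by_cases h2 : c = '{'
      · simp [h2]
      · have b1 : (c == '<') = false := by simp [h1]
        have b2 : (c == '{') = false := by simp [h2]
        simp only [b1, b2, Bool.or_self, Bool.false_eq_true, if_false]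
        have g : ∀ (o : Option Nat) (n : Nat), ((o.map (· + 1)).getD (n + 1)) = o.getD n + 1 := by
          intro o n; cases o <;> simp
        simp only [List.length_cons, g]
        omega

-- the two tokenizers agree
theorem pvTokEq : ∀ (n : Nat) (cs : List Char), cs.length ≤ n → pvTokB cs = pvTokA cs := by
  intro n
  induction n with
  | zero =>
    intro cs h
    rw [Nat.le_zero, List.length_eq_zero_iff] at h
    subst h
    simp [pvTokB, pvTokA]
  | succ n ih =>
    intro cs h
    match cs with
    | [] => simp [pvTokB, pvTokA]
    | c :: rest =>
      simp only [List.length_cons, Nat.succ_le_succ_iff] at h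
      by_cases hsp : c = ' '
      · simp only [pvTokB, pvTokA, if_pos hsp]
        exact ih rest h
      · by_cases hbr : c = '{'
        · subst hbr
          simp only [pvTokB, pvTokA, if_neg hsp, reduceIte]
          rw [pvBraceJump_eq rest 1 le_rfl, pvBrace_split rest 1 ['{'] le_rfl]
          simp only [List.reverse_cons, List.reverse_nil, List.nil_append, List.singleton_append]
          rw [ih (rest.drop (pvBraceLenB rest 1)) (le_trans (by simp) h)]
        · by_cases htag : c = '<'
          · subst htag
            simp only [pvTokB, pvTokA, if_neg hsp, if_neg hbr, reduceIte]
            rw [pvTag_split rest ['<']]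
            cases hfi : rest.findIdx? (· == '>') with
            | none =>
              obtain ⟨e1, e2⟩ := pvFindGtNone rest hfi
              simp [e1, e2, pvTokA]
            | some j =>
              obtain ⟨e1, e2, e3⟩ := pvFindGt rest j hfi
              simp only [e1, e2, if_neg e3]
              rw [ih ((rest.dropWhile (· != '>')).tail)
                (le_trans (List.Sublist.length_le ((List.tail_sublist _).trans
                  (List.dropWhile_sublist _))) h)]
              simp
          · simp only [pvTokB, pvTokA, if_neg hsp, if_neg hbr, if_neg htag]
            rw [pvText_split rest [c]]
            simp only [List.reverse_singleton, List.singleton_append]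
            have hpred : (fun x : Char => !(x == '<' || x == '{')) = (fun x => x != '<' && x != '{') := by
              funext x
              simp [Bool.not_or, bne]
            have hk : min ((rest.findIdx? (· == '<')).getD rest.length)
                ((rest.findIdx? (· == '{')).getD rest.length)
                = (rest.findIdx? (fun x => x == '<' || x == '{')).getD rest.length := pvFindMin rest
            obtain ⟨e1, e2⟩ := pvTakeFind (fun x => x == '<' || x == '{') rest
            rw [hpred] at e1 e2
            rw [hk, e1, e2]
            have hr : (rest.dropWhile (fun x => x != '<' && x != '{')).length ≤ n :=
              le_trans (List.Sublist.length_le (List.dropWhile_sublist _)) h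
            split_ifs with ht
            · exact ih _ hr
            · rw [ih _ hr]

-- the staged emit/min/zip pipeline equals A's clamped-depth rendering
-- (invariants: m ≤ p, m ≤ 0; the clamped depth is p − m)
theorem pvZip (base : List Char) : ∀ (ts : List (List Char)) (p m : Int), m ≤ p → m ≤ 0 →
    List.zipWith (fun t pm => base ++ pvDup (pm.1 - pm.2).toNat ++ t) ts
      ((pvEmitB ts p).zip (pvMinB (pvEmitB ts p) m)) = pvRender base ts (p - m).toNat := by
  intro ts
  induction ts with
  | nil => intro p m _ _; simp [pvEmitB, pvMinB, pvRender]
  | cons t ts ih =>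
    intro p m hmp hm0
    by_cases hcl : PySem.Chars.startswith t ['<', '/'] = true
    · have hop : pvOpenerB t = false := by simp [pvOpenerB, hcl]
      simp only [pvEmitB, pvMinB, hcl, hop, if_true, if_false, Bool.false_eq_true,
        List.zip_cons_cons, List.zipWith_cons_cons, pvRender]
      rw [ih (p - 1) (min m (p - 1)) (by omega) (by omega)]
      have e1 : ((p - 1) - min m (p - 1)).toNat = (p - m).toNat - 1 := by omega
      rw [e1]
    · have hcl' : PySem.Chars.startswith t ['<', '/'] = false := by
        simpa using hcl
      have hopeq : pvOpenerB t = (PySem.Chars.startswith t ['<']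
          && !PySem.Chars.endswith t ['/', '>'] && PySem.Chars.isIn ['>'] t) := by
        cases h1 : PySem.Chars.startswith t ['<'] <;>
          cases h2 : PySem.Chars.endswith t ['/', '>'] <;>
          cases h3 : PySem.Chars.isIn ['>'] t <;>
          simp [pvOpenerB, hcl', h1, h2, h3]
      have hminm : min m p = m := min_eq_left hmp
      by_cases hop : (PySem.Chars.startswith t ['<'] && !PySem.Chars.endswith t ['/', '>']
          && PySem.Chars.isIn ['>'] t) = true
      · simp only [pvEmitB, pvMinB, hcl', hopeq, hop, Bool.false_eq_true, if_false, if_true,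
          List.zip_cons_cons, List.zipWith_cons_cons, pvRender]
        rw [ih (p + 1) (min m p) (by omega) (by omega)]
        rw [hminm]
        have e1 : ((p + 1) - m).toNat = (p - m).toNat + 1 := by omega
        rw [e1]
      · simp only [pvEmitB, pvMinB, hcl', hopeq, hop, Bool.false_eq_true, if_false,
          List.zip_cons_cons, List.zipWith_cons_cons, pvRender]
        rw [ih p (min m p) (by omega) (by omega)]
        rw [hminm]

-- ===== VERDICT (by name: the statement is the Claim_ definition above) =====
theorem format_jsx_return_py_spec : Claim_equal_format_jsx_return_py := by
  intro jsx indent _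
  unfold Spec_format_jsx_return_py format_jsx_return_py format_jsx_return_py_alt
  simp only [pvFoldA, pvTokEq (PySem.Chars.strip jsx.toList).length (PySem.Chars.strip jsx.toList) le_rfl]
  rw [pvZip _ _ 0 0 le_rfl le_rfl]
  simp
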